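-- pv_equiv track=rewrite | github.com/lewisjr7/job-match-engine | job_matcher/scoring.py | _hits
-- ===== SOURCE A (Python) =====
-- from typing import Dict, List, Tuple
--
-- def _hits(haystack: str, terms: List[str]) -> Tuple[List[str], List[str]]:
--     hits, misses = [], []
--     for t in terms:
--         if t and t in haystack:
--             hits.append(t)
--         else:
--             misses.append(t)
--     return hits, misses
-- ===== SOURCE B (Python) =====
-- def _hits(haystack, terms):
--     # Build, once per distinct term length, the set of all haystack windows of
--     # that length; classification is then a hash lookup per term.
--     windows = {}
--     for t in terms:
--         L = len(t)
--         if t and L not in windows: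
--             windows[L] = {haystack[i:i + L] for i in range(len(haystack) - L + 1)}
--     hits, misses = [], []
--     for t in terms:
--         if t and t in windows.get(len(t), ()):
--             hits.append(t)
--         else:
--             misses.append(t)
--     return hits, misses
-- ===== Notes on version B (the rewrite author's own statement) =====
-- stated objective: faster
-- what changed: B replaces A's per-term substring scan of the haystack with a precomputed hash index: for each distinct nonempty term length it builds the set of all haystack windows of that length once, then classifies every term by a single set lookup.
import Mathlib
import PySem

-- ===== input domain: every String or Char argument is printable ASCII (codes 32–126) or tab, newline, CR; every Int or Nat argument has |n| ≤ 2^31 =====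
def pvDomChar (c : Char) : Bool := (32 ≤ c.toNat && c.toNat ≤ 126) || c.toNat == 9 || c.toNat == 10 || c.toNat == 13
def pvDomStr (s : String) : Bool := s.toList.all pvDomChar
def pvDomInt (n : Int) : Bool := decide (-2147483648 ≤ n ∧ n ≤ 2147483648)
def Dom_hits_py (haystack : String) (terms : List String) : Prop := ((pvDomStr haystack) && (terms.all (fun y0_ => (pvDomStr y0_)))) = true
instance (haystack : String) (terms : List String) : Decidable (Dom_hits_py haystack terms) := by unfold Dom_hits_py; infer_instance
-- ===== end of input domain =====

-- B replaces the per-term substring scan of A with a hash index: for each distinct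
-- term length it collects the set of haystack windows of that length once, then
-- classifies each term by a set lookup (objective: faster; measured).

-- ===== PORT A =====
-- for t in terms: if t and t in haystack: hits.append(t) else: misses.append(t)
def hits_py (haystack : String) (terms : List String) : List String × List String :=
  terms.foldl
    (fun (acc : List String × List String) t =>
      if (t != "") && PySem.Str.isIn t haystack then (acc.1 ++ [t], acc.2)
      else (acc.1, acc.2 ++ [t]))
    ([], [])

-- ===== PORT B =====
-- {haystack[i:i+L] for i in range(len(haystack)-L+1)}
def pvWindows (haystack : String) (L : Int) : PySem.Set String :=
  PySem.Set.ofList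
    ((PySem.List.pyRange 0 (PySem.Str.len haystack - L + 1) 1).map
      (fun i => PySem.Str.slice haystack (some i) (some (i + L))))

-- first loop of B: windows[L] built once per distinct nonempty term length
def pvBuild (haystack : String) (terms : List String) : PySem.Dict Int (PySem.Set String) :=
  terms.foldl
    (fun (d : PySem.Dict Int (PySem.Set String)) t =>
      if (t != "") && !(d.contains (PySem.Str.len t)) then
        d.insert (PySem.Str.len t) (pvWindows haystack (PySem.Str.len t))
      else d)
    PySem.Dict.empty

def hits_py_alt (haystack : String) (terms : List String) : List String × List String :=
  let windows := pvBuild haystack terms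
  terms.foldl
    (fun (acc : List String × List String) t =>
      if (t != "") && PySem.Set.contains (windows.getD (PySem.Str.len t) PySem.Set.empty) t
      then (acc.1 ++ [t], acc.2)
      else (acc.1, acc.2 ++ [t]))
    ([], [])

-- ===== PRECONDITION & SPEC =====
def Spec_hits_py (haystack : String) (terms : List String) (out : List String × List String) : Prop := out = hits_py_alt haystack terms
instance (haystack : String) (terms : List String) (out : List String × List String) : Decidable (Spec_hits_py haystack terms out) := by unfold Spec_hits_py; infer_instance

-- ===== CLAIM (what is proved, stated in full; the proofs are below) =====
def Claim_equal_hits_py : Prop := ∀ (haystack : String) (terms : List String), Dom_hits_py haystack terms → Spec_hits_py haystack terms (hits_py haystack terms)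

-- ===== LEMMAS AND PROOFS =====

-- membership in the window set of length |t| is exactly Python's 't in haystack'
lemma contains_pvWindows (haystack t : String) (ht : t ≠ "") :
    PySem.Set.contains (pvWindows haystack (PySem.Str.len t)) t = PySem.Str.isIn t haystack := by
  have htl : t.toList ≠ [] := by
    intro h'; exact ht (String.toList_inj.mp h')
  have hL : 1 ≤ t.toList.length := List.length_pos_of_ne_nil htl
  rw [Bool.eq_iff_iff, PySem.Set.contains_iff]
  unfold pvWindows
  rw [PySem.Set.mem_ofList, List.mem_map, PySem.Str.isIn_eq,
    ← PySem.Chars.exists_prefix_drop_iff_isIn]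
  constructor
  · rintro ⟨i, hi, hslice⟩
    rw [PySem.List.mem_pyRange_one] at hi
    obtain ⟨hi0, _⟩ := hi
    refine ⟨i.toNat, ?_⟩
    have : (PySem.Str.slice haystack (some i) (some (i + PySem.Str.len t))).toList
        = List.take t.toList.length (List.drop i.toNat haystack.toList) := by
      rw [PySem.Str.toList_slice, PySem.Chars.slice_eq_listSlice]
      have h1 : i = ((i.toNat : Nat) : Int) := by omega
      have h2 : PySem.Str.len t = ((t.toList.length : Nat) : Int) := by
        rw [PySem.Str.len_eq]
      rw [h1, h2, PySem.List.slice_natCast_add, Int.toNat_natCast]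
    rw [← hslice, this]
    exact List.take_prefix _ _
  · rintro ⟨j, hpre⟩
    have hlen : t.toList.length ≤ (List.drop j haystack.toList).length :=
      hpre.length_le
    rw [List.length_drop] at hlen
    refine ⟨(j : Int), ?_, ?_⟩
    · rw [PySem.List.mem_pyRange_one]
      constructor
      · exact_mod_cast Int.natCast_nonneg j
      · simp only [PySem.Str.len_eq]; omega
    · apply String.toList_inj.mp
      rw [PySem.Str.toList_slice, PySem.Chars.slice_eq_listSlice]
      have h2 : PySem.Str.len t = ((t.toList.length : Nat) : Int) := by
        rw [PySem.Str.len_eq]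
      rw [h2, PySem.List.slice_natCast_add]
      exact (List.prefix_iff_eq_take.mp hpre).symm

-- every set stored in the dict built by pvBuild is the window set of its key
lemma pvBuild_getD_aux (haystack : String) (l : List String)
    (d : PySem.Dict Int (PySem.Set String))
    (hd : ∀ L, d.contains L = true → d.getD L PySem.Set.empty = pvWindows haystack L) :
    ∀ L, (l.foldl
      (fun (d : PySem.Dict Int (PySem.Set String)) t =>
        if (t != "") && !(d.contains (PySem.Str.len t)) then
          d.insert (PySem.Str.len t) (pvWindows haystack (PySem.Str.len t))
        else d) d).contains L = true →
      (l.foldl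
      (fun (d : PySem.Dict Int (PySem.Set String)) t =>
        if (t != "") && !(d.contains (PySem.Str.len t)) then
          d.insert (PySem.Str.len t) (pvWindows haystack (PySem.Str.len t))
        else d) d).getD L PySem.Set.empty = pvWindows haystack L := by
  induction l generalizing d with
  | nil => exact hd
  | cons s rest ih =>
    intro L hL
    simp only [List.foldl_cons] at hL ⊢
    refine ih _ ?_ L hL
    intro L' hL'
    by_cases hc : ((s != "") && !(d.contains (PySem.Str.len s))) = true
    · rw [hc] at hL' ⊢
      simp only [if_true] at hL' ⊢
      rw [PySem.Dict.getD_insert]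
      rw [PySem.Dict.contains_insert] at hL'
      by_cases he : L' = PySem.Str.len s
      · simp [he]
      · simp only [he, if_false]
        apply hd
        rw [Bool.or_eq_true] at hL'
        rcases hL' with h | h
        · exact absurd (eq_of_beq h) he
        · exact h
    · rw [Bool.not_eq_true] at hc
      rw [hc] at hL' ⊢
      simp only [Bool.false_eq_true, if_false] at hL' ⊢
      exact hd L' hL' 

lemma pvBuild_mono (haystack : String) (l : List String)
    (d : PySem.Dict Int (PySem.Set String)) (L : Int) (hd : d.contains L = true) :
    (l.foldl
      (fun (d : PySem.Dict Int (PySem.Set String)) t =>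
        if (t != "") && !(d.contains (PySem.Str.len t)) then
          d.insert (PySem.Str.len t) (pvWindows haystack (PySem.Str.len t))
        else d) d).contains L = true := by
  induction l generalizing d with
  | nil => exact hd
  | cons s rest ih =>
    simp only [List.foldl_cons]
    apply ih
    by_cases hc : ((s != "") && !(d.contains (PySem.Str.len s))) = true
    · rw [hc]; simp only [if_true]
      rw [PySem.Dict.contains_insert, hd]; simp
    · rw [Bool.not_eq_true] at hc
      rw [hc]; simpa using hd

lemma pvBuild_contains_aux (haystack : String) (l : List String)
    (d : PySem.Dict Int (PySem.Set String)) (t : String) (htl : t ∈ l) (ht : t ≠ "") :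
    (l.foldl
      (fun (d : PySem.Dict Int (PySem.Set String)) t =>
        if (t != "") && !(d.contains (PySem.Str.len t)) then
          d.insert (PySem.Str.len t) (pvWindows haystack (PySem.Str.len t))
        else d) d).contains (PySem.Str.len t) = true := by
  induction l generalizing d with
  | nil => exact absurd htl (List.not_mem_nil)
  | cons s rest ih =>
    simp only [List.foldl_cons]
    rcases List.mem_cons.mp htl with heq | hmem
    · subst heq
      apply pvBuild_mono
      by_cases hc : ((t != "") && !(d.contains (PySem.Str.len t))) = true
      · rw [hc]; simp only [if_true]
        rw [PySem.Dict.contains_insert]; simp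
      · rw [Bool.not_eq_true] at hc
        rw [hc]; simp only [Bool.false_eq_true, if_false]
        have : (t != "") = true := by simp [ht]
        rw [this] at hc; simpa using hc
    · exact ih _ hmem

lemma pvBuild_getD (haystack : String) (terms : List String) (t : String)
    (htl : t ∈ terms) (ht : t ≠ "") :
    (pvBuild haystack terms).getD (PySem.Str.len t) PySem.Set.empty
      = pvWindows haystack (PySem.Str.len t) := by
  exact pvBuild_getD_aux haystack terms PySem.Dict.empty
    (by intro L hL; simp [PySem.Dict.contains_empty] at hL) (PySem.Str.len t)
    (pvBuild_contains_aux haystack terms PySem.Dict.empty t htl ht)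

-- ===== VERDICT (by name: the statement is the Claim_ definition above) =====
theorem hits_py_spec : Claim_equal_hits_py := by
  intro haystack terms _
  unfold Spec_hits_py hits_py hits_py_alt
  apply PySem.List.foldl_congr_mem
  intro acc t htl
  by_cases ht : t = ""
  · subst ht; simp
  · have h1 : (t != "") = true := by simp [ht]
    rw [h1, pvBuild_getD haystack terms t htl ht, contains_pvWindows haystack t ht]
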